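-- pv_equiv track=rewrite | github.com/yutaokkots/Algorithms-and-Data-Structures | data_structures_and_algorithms/Problems/codesig/codesig_L04-016_areSimilar.py | solution
-- ===== SOURCE A (Python) =====
-- def solution(a, b):
--     if len(a) != len(b):
--         return False
--     swap_index = 0
--     counter = 1
--     for i in range(len(a)):
--         if a[i] != b[i] and counter == 1:
--             swap_index = i
--             counter -= 1
--             continue
--         if a[i] != b[i] and counter == 0:
--             a[swap_index], a[i] = a[i], a[swap_index]
--             counter -= 1
--             continue
--
--     return a == b
-- ===== SOURCE B (Python) =====
-- def solution(a, b):
--     if len(a) != len(b):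
--         return False
--     mm = None
--     for i in range(len(a)):
--         if a[i] != b[i]:
--             if mm is None:
--                 mm = (a[i], b[i])
--             elif mm == (b[i], a[i]):
--                 mm = ()
--             else:
--                 return False
--     return mm is None or mm == ()
-- ===== Notes on version B (the rewrite author's own statement) =====
-- stated objective: alternative
-- what changed: A physically swaps the first two mismatch positions in a and then compares the whole lists; B never mutates or compares lists: it runs a small state machine over the value pairs, recording the first mismatched pair and accepting only if a later mismatch is its exact cross (b[i],a[i]) and no further mismatch occurs, with early exit on a third mismatch.
import Mathlib
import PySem

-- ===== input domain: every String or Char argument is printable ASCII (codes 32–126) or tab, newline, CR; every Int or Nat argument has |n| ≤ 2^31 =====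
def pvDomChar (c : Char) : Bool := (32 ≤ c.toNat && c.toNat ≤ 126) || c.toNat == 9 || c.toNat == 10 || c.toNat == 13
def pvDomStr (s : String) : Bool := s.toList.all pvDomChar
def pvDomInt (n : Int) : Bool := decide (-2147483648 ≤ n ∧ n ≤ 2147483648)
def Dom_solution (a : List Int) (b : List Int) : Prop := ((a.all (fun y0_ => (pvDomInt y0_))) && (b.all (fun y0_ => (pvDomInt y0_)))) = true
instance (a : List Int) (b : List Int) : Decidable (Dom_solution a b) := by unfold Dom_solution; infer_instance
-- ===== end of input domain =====

-- B decides by a state machine over mismatched value pairs (cross-equality check, early exit) instead of A's swap-then-compare; equivalence is about the RETURN value only — A mutates `a` in place when it sees two mismatches, B never mutates.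


-- the mismatch test  a[i] != b[i]  (shared by both ports)
def pvNe (a b : List Int) (i : Int) : Bool :=
  decide (PySem.List.pyGetD a i 0 ≠ PySem.List.pyGetD b i 0)

-- ===== PORT A =====
-- Python's simultaneous swap  a[j], a[i] = a[i], a[j]
def pvSwap (xs : List Int) (j k : Int) : List Int :=
  PySem.List.pySetD (PySem.List.pySetD xs j (PySem.List.pyGetD xs k 0)) k (PySem.List.pyGetD xs j 0)

-- loop body of A: state = (a, swap_index, counter)
def pvStep (b : List Int) (st : List Int × Int × Int) (i : Int) : List Int × Int × Int :=
  if pvNe st.1 b i ∧ st.2.2 = 1 then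
    (st.1, i, st.2.2 - 1)
  else if pvNe st.1 b i ∧ st.2.2 = 0 then
    (pvSwap st.1 st.2.1 i, st.2.1, st.2.2 - 1)
  else st

def solution (a : List Int) (b : List Int) : Bool :=
  if a.length ≠ b.length then false
  else
    (((PySem.List.pyRange 0 (a.length : Int) 1).foldl (pvStep b) (a, 0, 1)).1 == b)

-- ===== PORT B =====
-- Python's mm variable: None, a pair (x, y), or the empty tuple ()
inductive PvMm : Type
  | null : PvMm
  | pair : Int → Int → PvMm
  | done : PvMm
deriving DecidableEq, Repr

-- B's loop with early return: recursion over the remaining index list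
def pvBLoop (a b : List Int) (mm : PvMm) : List Int → Bool
  | [] => mm == PvMm.null || mm == PvMm.done
  | i :: t =>
      if pvNe a b i then
        match mm with
        | PvMm.null => pvBLoop a b (PvMm.pair (PySem.List.pyGetD a i 0) (PySem.List.pyGetD b i 0)) t
        | PvMm.pair x y =>
            if x = PySem.List.pyGetD b i 0 ∧ y = PySem.List.pyGetD a i 0 then
              pvBLoop a b PvMm.done t
            else false
        | PvMm.done => false
      else pvBLoop a b mm t

def solution_alt (a : List Int) (b : List Int) : Bool :=
  if a.length ≠ b.length then false
  else pvBLoop a b PvMm.null (PySem.List.pyRange 0 (a.length : Int) 1)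

-- ===== PRECONDITION & SPEC =====
def Spec_solution (a : List Int) (b : List Int) (out : Bool) : Prop := out = solution_alt a b
instance (a : List Int) (b : List Int) (out : Bool) : Decidable (Spec_solution a b out) := by unfold Spec_solution; infer_instance

-- ===== CLAIM (what is proved, stated in full; the proofs are below) =====
def Claim_equal_solution : Prop := ∀ (a : List Int) (b : List Int), Dom_solution a b → Spec_solution a b (solution a b)

-- ===== LEMMAS AND PROOFS =====

-- closed form of A's final loop state, as a function of the mismatch-index list
def pvFinal (a : List Int) (s : Int) (m : List Int) : List Int × Int × Int :=
  match m with
  | [] => (a, s, 1)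
  | [j] => (a, j, 0)
  | j :: k :: _ => (pvSwap a j k, j, -1)

-- with counter = -1 neither branch of A's loop ever fires again
theorem pvStep_neg (b : List Int) (av : List Int) (j : Int) (l : List Int) :
    l.foldl (pvStep b) (av, j, -1) = (av, j, -1) := by
  induction l with
  | nil => rfl
  | cons i t ih => simpa [List.foldl, pvStep] using ih

-- with counter = 0 the loop swaps at the next mismatch and then freezes
theorem pvStep_zero (a b : List Int) (j : Int) (l : List Int) :
    l.foldl (pvStep b) (a, j, 0) =
      match l.filter (pvNe a b) with
      | [] => (a, j, 0)
      | k :: _ => (pvSwap a j k, j, -1) := by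
  induction l with
  | nil => rfl
  | cons i t ih =>
    rw [List.foldl_cons, List.filter_cons]
    by_cases h : pvNe a b i = true
    · have hstep : pvStep b (a, j, 0) i = (pvSwap a j i, j, -1) := by
        simp [pvStep, h]
      rw [hstep, pvStep_neg, h]
      rfl
    · have hstep : pvStep b (a, j, 0) i = (a, j, 0) := by
        simp [pvStep, h]
      rw [hstep, ih]
      simp [h]

-- A's whole loop, started in the initial state, in closed form
theorem pvStep_one (a b : List Int) (s : Int) (l : List Int) :
    l.foldl (pvStep b) (a, s, 1) = pvFinal a s (l.filter (pvNe a b)) := by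
  induction l generalizing s with
  | nil => rfl
  | cons i t ih =>
    rw [List.foldl_cons, List.filter_cons]
    by_cases h : pvNe a b i = true
    · have hstep : pvStep b (a, s, 1) i = (a, i, 0) := by
        simp [pvStep, h]
      rw [hstep, pvStep_zero, h]
      simp only [if_true]
      rcases t.filter (pvNe a b) with _ | ⟨k, r⟩ <;> rfl
    · have hstep : pvStep b (a, s, 1) i = (a, s, 1) := by
        simp [pvStep, h]
      rw [hstep, ih]
      simp [h]

-- B's loop from the terminal state: accepts iff no mismatch remains
theorem pvBLoop_done (a b : List Int) (l : List Int) :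
    pvBLoop a b PvMm.done l = (l.filter (pvNe a b) == []) := by
  induction l with
  | nil => rfl
  | cons i t ih =>
    rw [List.filter_cons]
    by_cases h : pvNe a b i = true
    · simp [pvBLoop, h]
    · have hstep : pvBLoop a b PvMm.done (i :: t) = pvBLoop a b PvMm.done t := by
        simp [pvBLoop, h]
      rw [hstep, ih]
      simp [h]

-- B's loop from a pending pair: the next mismatch must be the exact cross and the last
theorem pvBLoop_pair (a b : List Int) (x y : Int) (l : List Int) :
    pvBLoop a b (PvMm.pair x y) l =
      match l.filter (pvNe a b) with
      | [] => false
      | k :: r =>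
          (decide (x = PySem.List.pyGetD b k 0 ∧ y = PySem.List.pyGetD a k 0) && (r == [])) := by
  induction l with
  | nil => rfl
  | cons i t ih =>
    rw [List.filter_cons]
    by_cases h : pvNe a b i = true
    · have hstep : pvBLoop a b (PvMm.pair x y) (i :: t) =
          (if x = PySem.List.pyGetD b i 0 ∧ y = PySem.List.pyGetD a i 0 then
              pvBLoop a b PvMm.done t else false) := by
        simp [pvBLoop, h]
      rw [hstep]
      simp only [h, if_true]
      by_cases hc : x = PySem.List.pyGetD b i 0 ∧ y = PySem.List.pyGetD a i 0
      · rw [if_pos hc, pvBLoop_done]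
        simp [hc]
      · rw [if_neg hc]
        simp [hc]
    · have hstep : pvBLoop a b (PvMm.pair x y) (i :: t) = pvBLoop a b (PvMm.pair x y) t := by
        simp [pvBLoop, h]
      rw [hstep, ih]
      simp [h]

-- B's whole loop in closed form over the mismatch-index list
theorem pvBLoop_null (a b : List Int) (l : List Int) :
    pvBLoop a b PvMm.null l =
      match l.filter (pvNe a b) with
      | [] => true
      | [_] => false
      | j :: k :: r =>
          (decide (PySem.List.pyGetD a j 0 = PySem.List.pyGetD b k 0 ∧
                   PySem.List.pyGetD b j 0 = PySem.List.pyGetD a k 0) && (r == [])) := by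
  induction l with
  | nil => rfl
  | cons i t ih =>
    rw [List.filter_cons]
    by_cases h : pvNe a b i = true
    · have hstep : pvBLoop a b PvMm.null (i :: t) =
          pvBLoop a b (PvMm.pair (PySem.List.pyGetD a i 0) (PySem.List.pyGetD b i 0)) t := by
        simp [pvBLoop, h]
      rw [hstep, pvBLoop_pair]
      simp only [h, if_true]
      rcases t.filter (pvNe a b) with _ | ⟨k, r⟩ <;> rfl
    · have hstep : pvBLoop a b PvMm.null (i :: t) = pvBLoop a b PvMm.null t := by
        simp [pvBLoop, h]
      rw [hstep, ih]
      simp [h]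

-- membership in the mismatch-index list
theorem pv_mem_mism (a b : List Int) (i : Int) :
    i ∈ (PySem.List.pyRange 0 (a.length : Int) 1).filter (pvNe a b) ↔
      (0 ≤ i ∧ i < (a.length : Int)) ∧ pvNe a b i = true := by
  simp [List.mem_filter, PySem.List.mem_pyRange_one]

-- the mismatch-index list is strictly increasing
theorem pv_sorted_mism (a b : List Int) :
    ((PySem.List.pyRange 0 (a.length : Int) 1).filter (pvNe a b)).Pairwise (· < ·) :=
  List.Pairwise.sublist (List.filter_sublist) (PySem.List.pairwise_lt_pyRange_one 0 _)

-- the mismatch test at a natural index, in getElem form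
theorem pvNe_nat (a b : List Int) (i : Nat) (ha : i < a.length) (hb : i < b.length) :
    pvNe a b (i : Int) = true ↔ a[i] ≠ b[i] := by
  simp [pvNe, PySem.List.pyGetD_natCast, ha, hb]

-- if the mismatch list is empty the lists are equal
theorem pv_nil_eq (a b : List Int) (hlen : a.length = b.length)
    (hm : (PySem.List.pyRange 0 (a.length : Int) 1).filter (pvNe a b) = []) : a = b := by
  apply List.ext_getElem hlen
  intro i h1 h2
  by_contra hne
  have hmem : (i : Int) ∈ (PySem.List.pyRange 0 (a.length : Int) 1).filter (pvNe a b) :=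
    (pv_mem_mism a b i).mpr ⟨⟨by positivity, by exact_mod_cast h1⟩, (pvNe_nat a b i h1 h2).mpr hne⟩
  rw [hm] at hmem
  exact absurd hmem (List.not_mem_nil)

-- the two-or-more-mismatches case: swap-and-compare equals cross-check-and-no-rest
theorem pv_swap_case (a b : List Int) (hlen : a.length = b.length) (j k : Int) (r : List Int)
    (hm : (PySem.List.pyRange 0 (a.length : Int) 1).filter (pvNe a b) = j :: k :: r) :
    (pvSwap a j k == b) =
      (decide (PySem.List.pyGetD a j 0 = PySem.List.pyGetD b k 0 ∧
               PySem.List.pyGetD b j 0 = PySem.List.pyGetD a k 0) && (r == [])) := by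
  have hj := (pv_mem_mism a b j).mp (by rw [hm]; simp)
  have hk := (pv_mem_mism a b k).mp (by rw [hm]; simp)
  have hsort := pv_sorted_mism a b
  rw [hm, List.pairwise_cons] at hsort
  have hjk : j < k := hsort.1 k (by simp)
  have hkr : ∀ i ∈ r, k < i := fun i hi => (List.pairwise_cons.mp hsort.2).1 i hi
  have h0j : 0 ≤ j := hj.1.1
  have h0k : 0 ≤ k := hk.1.1
  have hjn : j.toNat < a.length := by omega
  have hkn : k.toNat < a.length := by omega
  have hjb : j.toNat < b.length := by omega
  have hkb : k.toNat < b.length := by omega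
  have hnejk : j.toNat ≠ k.toNat := by omega
  have hs_eq : pvSwap a j k = (a.set j.toNat (a[k.toNat])).set k.toNat (a[j.toNat]) := by
    unfold pvSwap
    rw [PySem.List.pyGetD_eq_getElem a (i := k) 0 h0k hk.1.2,
        PySem.List.pyGetD_eq_getElem a (i := j) 0 h0j hj.1.2,
        PySem.List.pySetD_of_nonneg a _ h0j, PySem.List.pySetD_of_nonneg _ _ h0k]
  rw [hs_eq, PySem.List.pyGetD_eq_getElem a (i := j) 0 h0j hj.1.2,
      PySem.List.pyGetD_eq_getElem a (i := k) 0 h0k hk.1.2,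
      PySem.List.pyGetD_eq_getElem b (i := j) 0 h0j (by omega),
      PySem.List.pyGetD_eq_getElem b (i := k) 0 h0k (by omega)]
  apply Bool.eq_iff_iff.mpr
  simp only [beq_iff_eq, Bool.and_eq_true, decide_eq_true_eq]
  constructor
  · intro hs
    have hpt : ∀ i : Nat, ((a.set j.toNat (a[k.toNat])).set k.toNat (a[j.toNat]))[i]? = b[i]? := by
      intro i; rw [hs]
    have hAk : a[j.toNat] = b[k.toNat] := by
      have := hpt k.toNat
      rw [List.getElem?_set_self (by simpa using hkn)] at this
      rw [List.getElem?_eq_getElem hkb] at this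
      exact Option.some_injective _ this
    have hAj : a[k.toNat] = b[j.toNat] := by
      have := hpt j.toNat
      rw [List.getElem?_set_ne (by omega), List.getElem?_set_self hjn,
          List.getElem?_eq_getElem hjb] at this
      exact Option.some_injective _ this
    refine ⟨⟨hAk, hAj.symm⟩, ?_⟩
    rcases r with _ | ⟨i, r'⟩
    · rfl
    · exfalso
      have hi := (pv_mem_mism a b i).mp (by rw [hm]; simp)
      have h0i : 0 ≤ i := hi.1.1
      have hin : i.toNat < a.length := by omega
      have hki : k < i := hkr i (by simp)
      have := hpt i.toNat
      rw [List.getElem?_set_ne (by omega), List.getElem?_set_ne (by omega),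
          List.getElem?_eq_getElem hin, List.getElem?_eq_getElem (by omega : i.toNat < b.length)] at this
      have hne := (pvNe_nat a b i.toNat hin (by omega)).mp (by
        have : ((i.toNat : Nat) : Int) = i := by omega
        rw [this]; exact hi.2)
      exact hne (Option.some_injective _ this)
  · rintro ⟨⟨h1, h2⟩, hr⟩
    subst hr
    apply List.ext_getElem (by simp [hlen])
    intro i hi1 hi2
    have hi : i < a.length := by simpa using hi1
    by_cases hik : i = k.toNat
    · subst hik
      rw [List.getElem_set_self]
      exact h1
    · by_cases hij : i = j.toNat
      · subst hij
        rw [List.getElem_set_ne (by omega), List.getElem_set_self]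
        exact h2.symm
      · rw [List.getElem_set_ne (by omega), List.getElem_set_ne (by omega)]
        by_contra hne
        have hmem : (i : Int) ∈ (PySem.List.pyRange 0 (a.length : Int) 1).filter (pvNe a b) :=
          (pv_mem_mism a b i).mpr ⟨⟨by positivity, by exact_mod_cast hi⟩,
            (pvNe_nat a b i hi (by omega)).mpr hne⟩
        rw [hm] at hmem
        simp only [List.mem_cons, List.not_mem_nil, or_false] at hmem
        rcases hmem with h | h <;> omega

-- ===== VERDICT (by name: the statement is the Claim_ definition above) =====
theorem solution_spec : Claim_equal_solution := by
  intro a b _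
  unfold Spec_solution solution solution_alt
  by_cases hlen : a.length = b.length
  · rw [if_neg (fun h => h hlen), if_neg (fun h => h hlen), pvStep_one, pvBLoop_null]
    rcases hm : (PySem.List.pyRange 0 (a.length : Int) 1).filter (pvNe a b) with _ | ⟨j, _ | ⟨k, r⟩⟩
    · simp only [pvFinal]
      simp [pv_nil_eq a b hlen hm]
    · simp only [pvFinal]
      have hj := (pv_mem_mism a b j).mp (by rw [hm]; simp)
      have hne : a ≠ b := by
        intro he
        subst he
        have := hj.2
        simp [pvNe] at this
      exact beq_eq_false_iff_ne.mpr hne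
    · simp only [pvFinal]
      exact pv_swap_case a b hlen j k r hm
  · simp [hlen]
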